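-- pv_equiv track=rewrite | github.com/karmar2525/Bioinformatics_MSA | Task.py | get_nw_path_coords
-- ===== SOURCE A (Python) =====
-- def get_nw_path_coords(aligned_a, aligned_b):
--     """
--     Calculates the coordinates of the optimal alignment path on the Needleman-Wunsch matrix.
--     This is used for plotting the path.
--
--     Args:
--         aligned_a (str): The first aligned sequence (with gaps).
--         aligned_b (str): The second aligned sequence (with gaps).
--
--     Returns:
--         list of tuple: A list of (row, column) coordinates representing the path.
--     """
--     coords = [(0, 0)]
--     x, y = 0, 0
--     for a, b in zip(aligned_a, aligned_b):
--         if a != '-' and b != '-':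
--             x += 1
--             y += 1
--         elif a != '-':
--             x += 1
--         elif b != '-':
--             y += 1
--         coords.append((x, y))
--     return coords
-- ===== SOURCE B (Python) =====
-- def get_nw_path_coords(aligned_a, aligned_b):
--     pairs = list(zip(aligned_a, aligned_b))
--     x = sum(1 for a, b in pairs if a != '-')
--     y = sum(1 for a, b in pairs if b != '-')
--     coords = [(x, y)]
--     for a, b in reversed(pairs):
--         if a != '-':
--             x -= 1
--         if b != '-':
--             y -= 1
--         coords.append((x, y))
--     coords.reverse()
--     return coords
-- ===== Notes on version B (the rewrite author's own statement) =====
-- stated objective: alternative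
-- what changed: B computes the total non-gap counts first, then reconstructs the path back-to-front by walking the zipped pairs in reverse and subtracting indicators, reversing the list at the end, instead of A's forward accumulation with nested branches.
import Mathlib
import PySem

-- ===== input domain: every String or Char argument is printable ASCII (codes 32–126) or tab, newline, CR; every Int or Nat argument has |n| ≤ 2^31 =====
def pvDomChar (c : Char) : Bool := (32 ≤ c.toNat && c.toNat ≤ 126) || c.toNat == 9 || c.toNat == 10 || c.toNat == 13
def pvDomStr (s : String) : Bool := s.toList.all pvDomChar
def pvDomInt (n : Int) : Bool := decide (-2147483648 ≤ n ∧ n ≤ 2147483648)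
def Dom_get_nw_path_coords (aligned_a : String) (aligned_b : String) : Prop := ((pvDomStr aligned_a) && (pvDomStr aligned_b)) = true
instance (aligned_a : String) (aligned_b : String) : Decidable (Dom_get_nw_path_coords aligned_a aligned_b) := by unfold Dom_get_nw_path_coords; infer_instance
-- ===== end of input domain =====

-- B computes total non-gap counts first, then rebuilds the path back-to-front over the
-- reversed pairs by subtraction, reversing the list at the end; objective: alternative.

-- ===== PORT A =====
-- the 'for a, b in zip(...)' loop with state x, y, coords (coords appended at the back)
def pvPathLoop : List (Char × Char) → Int → Int → List (Int × Int) → List (Int × Int)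
  | [], _, _, coords => coords
  | p :: rest, x, y, coords =>
    if p.1 ≠ '-' ∧ p.2 ≠ '-' then
      pvPathLoop rest (x + 1) (y + 1) (coords ++ [(x + 1, y + 1)])
    else if p.1 ≠ '-' then
      pvPathLoop rest (x + 1) y (coords ++ [(x + 1, y)])
    else if p.2 ≠ '-' then
      pvPathLoop rest x (y + 1) (coords ++ [(x, y + 1)])
    else
      pvPathLoop rest x y (coords ++ [(x, y)])

def get_nw_path_coords (aligned_a : String) (aligned_b : String) : List (Int × Int) :=
  pvPathLoop (aligned_a.toList.zip aligned_b.toList) 0 0 [(0, 0)]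

-- ===== PORT B =====
-- the 'for a, b in reversed(pairs)' loop with state x, y, coords (appended at the back)
def pvBackLoop : List (Char × Char) → Int → Int → List (Int × Int) → List (Int × Int)
  | [], _, _, coords => coords
  | p :: rest, x, y, coords =>
    let x' := if p.1 ≠ '-' then x - 1 else x
    let y' := if p.2 ≠ '-' then y - 1 else y
    pvBackLoop rest x' y' (coords ++ [(x', y')])

def get_nw_path_coords_alt (aligned_a : String) (aligned_b : String) : List (Int × Int) :=
  let pairs := aligned_a.toList.zip aligned_b.toList
  let x : Int := pairs.countP (fun p => p.1 ≠ '-')   -- sum(1 for a, b in pairs if a != '-')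
  let y : Int := pairs.countP (fun p => p.2 ≠ '-')
  (pvBackLoop pairs.reverse x y [(x, y)]).reverse

-- ===== PRECONDITION & SPEC =====
def Spec_get_nw_path_coords (aligned_a : String) (aligned_b : String) (out : List (Int × Int)) : Prop := out = get_nw_path_coords_alt aligned_a aligned_b
instance (aligned_a : String) (aligned_b : String) (out : List (Int × Int)) : Decidable (Spec_get_nw_path_coords aligned_a aligned_b out) := by unfold Spec_get_nw_path_coords; infer_instance

-- ===== CLAIM (what is proved, stated in full; the proofs are below) =====
def Claim_equal_get_nw_path_coords : Prop := ∀ (aligned_a : String) (aligned_b : String), Dom_get_nw_path_coords aligned_a aligned_b → Spec_get_nw_path_coords aligned_a aligned_b (get_nw_path_coords aligned_a aligned_b)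

-- ===== LEMMAS AND PROOFS =====

-- the forward step (A) and its inverse, the backward step (B), as pair-valued functions
def pvF (s : Int × Int) (p : Char × Char) : Int × Int :=
  (s.1 + (if p.1 ≠ '-' then 1 else 0), s.2 + (if p.2 ≠ '-' then 1 else 0))

def pvG (s : Int × Int) (p : Char × Char) : Int × Int :=
  (s.1 - (if p.1 ≠ '-' then 1 else 0), s.2 - (if p.2 ≠ '-' then 1 else 0))

theorem pvScanl_head {α β : Type} (f : β → α → β) (s : β) (l : List α) :
    List.scanl f s l = s :: (List.scanl f s l).tail := by
  cases l <;> simp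

theorem pvScanl_snoc {α β : Type} (f : β → α → β) (s : β) (l : List α) (p : α) :
    List.scanl f s (l ++ [p]) = List.scanl f s l ++ [f (l.foldl f s) p] := by
  induction l generalizing s with
  | nil => simp
  | cons q rest ih => simp [List.scanl_cons, ih]

theorem pvG_pvF (a : Int × Int) (p : Char × Char) : pvG (pvF a p) p = a := by
  simp [pvF, pvG]

theorem pvFold_unfold (l : List (Char × Char)) : ∀ a : Int × Int,
    List.foldl pvG (List.foldl pvF a l) l.reverse = a := by
  induction l with
  | nil => intro a; simp
  | cons p rest ih =>
    intro a
    simp [List.foldl_append, ih, pvG_pvF]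

-- reversing the forward scan gives the backward scan from the total
theorem pvScanl_reverse (l : List (Char × Char)) : ∀ s : Int × Int,
    (List.scanl pvF s l).reverse = List.scanl pvG (l.foldl pvF s) l.reverse := by
  induction l with
  | nil => intro s; simp [List.scanl]
  | cons p rest ih =>
    intro s
    have h : List.foldl pvF s (p :: rest) = List.foldl pvF (pvF s p) rest := by
      simp [List.foldl]
    rw [List.scanl_cons]
    simp only [List.reverse_cons, h]
    rw [pvScanl_snoc, ih, pvFold_unfold rest (pvF s p), pvG_pvF]

-- loop invariant of A's loop
theorem pvPathLoop_eq (l : List (Char × Char)) : ∀ (x y : Int) (coords : List (Int × Int)),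
    pvPathLoop l x y coords = coords ++ (List.scanl pvF (x, y) l).tail := by
  induction l with
  | nil => intro x y coords; simp [pvPathLoop]
  | cons p rest ih =>
    intro x y coords
    by_cases h1 : p.1 = '-' <;> by_cases h2 : p.2 = '-' <;>
      simp [pvPathLoop, h1, h2, ih, pvF] <;> exact (pvScanl_head _ _ _).symm

-- loop invariant of B's loop
theorem pvBackLoop_eq (l : List (Char × Char)) : ∀ (x y : Int) (coords : List (Int × Int)),
    pvBackLoop l x y coords = coords ++ (List.scanl pvG (x, y) l).tail := by
  induction l with
  | nil => intro x y coords; simp [pvBackLoop]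
  | cons p rest ih =>
    intro x y coords
    by_cases h1 : p.1 = '-' <;> by_cases h2 : p.2 = '-' <;>
      simp [pvBackLoop, h1, h2, ih, pvG] <;> exact (pvScanl_head _ _ _).symm

-- the totals B starts from are the forward fold of the indicators
theorem pvCount_fold (l : List (Char × Char)) : ∀ x y : Int,
    List.foldl pvF (x, y) l =
      (x + (l.countP (fun p => p.1 ≠ '-') : Int), y + (l.countP (fun p => p.2 ≠ '-') : Int)) := by
  induction l with
  | nil => intro x y; simp
  | cons p rest ih =>
    intro x y
    by_cases h1 : p.1 = '-' <;> by_cases h2 : p.2 = '-' <;>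
      simp [List.foldl, pvF, h1, h2, ih] <;> omega

-- a scanl ends with the fold of the whole list
theorem pvScanl_last {α β : Type} (f : β → α → β) (l : List α) : ∀ s : β,
    List.scanl f s l = (List.scanl f s l).dropLast ++ [List.foldl f s l] := by
  induction l with
  | nil => intro s; simp
  | cons p rest ih =>
    intro s
    rw [List.scanl_cons]
    conv_rhs => rw [ih (f s p), ← List.cons_append, List.dropLast_concat]
    rw [List.foldl_cons, List.cons_append]
    exact congrArg (s :: ·) (ih (f s p))

-- ===== VERDICT (by name: the statement is the Claim_ definition above) =====
theorem get_nw_path_coords_spec : Claim_equal_get_nw_path_coords := by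
  intro a b _
  show get_nw_path_coords a b = get_nw_path_coords_alt a b
  have hA : get_nw_path_coords a b = List.scanl pvF (0, 0) (a.toList.zip b.toList) := by
    unfold get_nw_path_coords
    rw [pvPathLoop_eq]
    conv_rhs => rw [pvScanl_head pvF (0, 0) (a.toList.zip b.toList)]
    simp
  have hB : get_nw_path_coords_alt a b = List.scanl pvF (0, 0) (a.toList.zip b.toList) := by
    unfold get_nw_path_coords_alt
    show (pvBackLoop (a.toList.zip b.toList).reverse
        ((a.toList.zip b.toList).countP (fun p => p.1 ≠ '-') : Int)
        ((a.toList.zip b.toList).countP (fun p => p.2 ≠ '-') : Int)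
        [(((a.toList.zip b.toList).countP (fun p => p.1 ≠ '-') : Int),
          ((a.toList.zip b.toList).countP (fun p => p.2 ≠ '-') : Int))]).reverse = _
    have htot : ((((a.toList.zip b.toList).countP (fun p => p.1 ≠ '-') : Int)),
        (((a.toList.zip b.toList).countP (fun p => p.2 ≠ '-') : Int))) =
        List.foldl pvF (0, 0) (a.toList.zip b.toList) := by
      rw [pvCount_fold]; simp
    rw [pvBackLoop_eq]
    rw [show ([((((a.toList.zip b.toList).countP (fun p => p.1 ≠ '-') : Int)),
        (((a.toList.zip b.toList).countP (fun p => p.2 ≠ '-') : Int)))] :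
        List (Int × Int)) = [List.foldl pvF (0, 0) (a.toList.zip b.toList)] from by rw [htot]]
    rw [show (List.scanl pvG
        ((((a.toList.zip b.toList).countP (fun p => p.1 ≠ '-') : Int)),
         (((a.toList.zip b.toList).countP (fun p => p.2 ≠ '-') : Int)))
        (a.toList.zip b.toList).reverse) = List.scanl pvG
        (List.foldl pvF (0, 0) (a.toList.zip b.toList)) (a.toList.zip b.toList).reverse
        from by rw [htot]]
    rw [← pvScanl_reverse]
    have hu := pvScanl_last pvF (a.toList.zip b.toList) (0, 0)
    rw [hu]
    simp [List.reverse_append]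
  rw [hA, hB]
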